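-- pv_equiv track=rewrite | github.com/KaleBhaskaraSrinivas/owlcoder | minimum_sum.py | solve
-- ===== SOURCE A (Python) =====
-- def solve(arr, n):
--     # code here
--     arr.sort()
--     fir=0
--     las=0
--     for i in range(n):
--         if i%2==0:
--             fir=fir*10+arr[i]
--         else:
--             las=las*10+arr[i]
--     return fir+las
-- ===== SOURCE B (Python) =====
-- def solve(arr, n):
--     arr.sort()
--     m = max(n, 0)
--     return sum(d * 10 ** ((m - 1 - i) // 2) for i, d in enumerate(arr[:m]))
-- ===== Notes on version B (the rewrite author's own statement) =====
-- stated objective: alternative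
-- what changed: A interleaves two accumulators with a parity branch over indices; B replaces the stateful interleaving by a closed-form positional-value formula: each sorted prefix element contributes d*10^((m-1-i)//2), summed in one pass with no parity test or dual accumulators. Pre_ excludes n > len(arr), where A raises IndexError.
import Mathlib
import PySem

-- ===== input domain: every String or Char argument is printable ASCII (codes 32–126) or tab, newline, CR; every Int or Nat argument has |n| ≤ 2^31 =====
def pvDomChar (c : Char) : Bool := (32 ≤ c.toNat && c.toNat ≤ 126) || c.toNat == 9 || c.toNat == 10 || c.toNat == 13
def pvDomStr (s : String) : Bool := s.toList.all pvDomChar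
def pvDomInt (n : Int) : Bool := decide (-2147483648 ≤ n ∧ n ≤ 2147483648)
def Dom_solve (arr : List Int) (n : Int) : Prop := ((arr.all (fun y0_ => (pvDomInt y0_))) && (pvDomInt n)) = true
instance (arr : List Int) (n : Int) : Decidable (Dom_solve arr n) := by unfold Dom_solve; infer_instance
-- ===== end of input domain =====

-- B replaces A's stateful interleaving (two accumulators, parity branch) by a closed-form
-- positional-value sum: element i of the sorted prefix contributes d * 10^((m-1-i)//2) ("alternative").
-- A sorts arr in place (B does the same); the equivalence proved is about the return value.

-- ===== PORT A =====
def solve (arr : List Int) (n : Int) : Int :=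
  let s := PySem.List.sorted arr (fun x => x) false
  let st := (PySem.List.pyRange 0 n 1).foldl
    (fun (p : Int × Int) i =>
      if PySem.Int.mod i 2 = 0 then (p.1 * 10 + PySem.List.pyGetD s i 0, p.2)
      else (p.1, p.2 * 10 + PySem.List.pyGetD s i 0)) (0, 0)
  st.1 + st.2

-- ===== PORT B =====
-- Python's '10 ** e' is integer power here since e = (m-1-i)//2 ≥ 0 for every i < m; '.toNat' is exact there.
def solve_alt (arr : List Int) (n : Int) : Int :=
  let s := PySem.List.sorted arr (fun x => x) false
  let m := max n 0
  (PySem.List.slice s none (some m)).zipIdx.foldl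
    (fun (acc : Int) (q : Int × Nat) =>
      acc + q.1 * 10 ^ (PySem.Int.floordiv (m - 1 - (q.2 : Int)) 2).toNat) 0

-- ===== PRECONDITION & SPEC =====
-- Pre_ excludes n > len(arr), on which A raises IndexError (arr[i] out of range); B returns there.
def Pre_solve (arr : List Int) (n : Int) : Prop := n ≤ (arr.length : Int)
instance (arr : List Int) (n : Int) : Decidable (Pre_solve arr n) := by unfold Pre_solve; infer_instance
def pvWitness_solve : List Int × Int := ([6, 8, 4, 5, 2, 3], 6)

def Spec_solve (arr : List Int) (n : Int) (out : Int) : Prop := out = solve_alt arr n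
instance (arr : List Int) (n : Int) (out : Int) : Decidable (Spec_solve arr n out) := by unfold Spec_solve; infer_instance

-- ===== CLAIM (what is proved, stated in full; the proofs are below) =====
def Claim_equal_solve : Prop := ∀ (arr : List Int) (n : Int), Dom_solve arr n → Pre_solve arr n → Spec_solve arr n (solve arr n)

-- ===== LEMMAS AND PROOFS =====

-- A's interleaved loop, abstracted: consume the prefix two at a time into the two accumulators
def goPair : List Int → Int → Int → Int
  | [], fir, las => fir + las
  | [a], fir, las => fir * 10 + a + las
  | a :: b :: t, fir, las => goPair t (fir * 10 + a) (las * 10 + b)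

-- B's closed-form weighted sum, as a recursion
def wsum : List Int → Int
  | [] => 0
  | x :: t => x * 10 ^ (t.length / 2) + wsum t

-- rotating one element into the accumulators swaps the roles of fir and las
theorem goPair_rot : ∀ (t : List Int) (f l x : Int), goPair (x :: t) f l = goPair t l (f * 10 + x)
  | [], f, l, x => by simp [goPair]; ring
  | [y], f, l, x => by simp [goPair]; ring
  | y :: z :: u, f, l, x => by
      show goPair (z :: u) (f * 10 + x) (l * 10 + y) = goPair u (l * 10 + y) ((f * 10 + x) * 10 + z)
      exact goPair_rot u (f * 10 + x) (l * 10 + y) z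

-- A's interleaved fold over the indexed elements equals the pairwise recursion
theorem fold_zipIdx_eq_goPair (t : List Int) : ∀ (i : Nat) (f l : Int),
    (((t.zipIdx i).foldl (fun (p : Int × Int) q =>
        if q.2 % 2 = 0 then (p.1 * 10 + q.1, p.2) else (p.1, p.2 * 10 + q.1)) (f, l)).1
     + ((t.zipIdx i).foldl (fun (p : Int × Int) q =>
        if q.2 % 2 = 0 then (p.1 * 10 + q.1, p.2) else (p.1, p.2 * 10 + q.1)) (f, l)).2)
    = if i % 2 = 0 then goPair t f l else goPair t l f := by
  induction t with
  | nil =>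
      intro i f l
      by_cases h : i % 2 = 0
      · simp [goPair, h]
      · simp [goPair, h]; ring
  | cons x t ih =>
      intro i f l
      rw [List.zipIdx_cons]
      by_cases hp : i % 2 = 0
      · have h1 : (i + 1) % 2 ≠ 0 := by omega
        simp only [List.foldl_cons, if_pos hp]
        have := ih (i + 1) (f * 10 + x) l
        rw [if_neg h1] at this
        rw [this, goPair_rot]
      · have h1 : (i + 1) % 2 = 0 := by omega
        simp only [List.foldl_cons, if_neg hp]
        have := ih (i + 1) f (l * 10 + x)
        rw [if_pos h1] at this
        rw [this, goPair_rot]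

-- an index fold over range m reading s equals a fold over the indexed prefix
theorem range_fold_eq_zipIdx {β : Type} (s : List Int) (F : β → Nat → Int → β) :
    ∀ (m : Nat), m ≤ s.length → ∀ (init : β),
    (List.range m).foldl (fun p k => F p k (s.getD k 0)) init
      = ((s.take m).zipIdx 0).foldl (fun p q => F p q.2 q.1) init := by
  intro m
  induction m with
  | zero => intro _ init; simp
  | succ m ih =>
      intro hm init
      have hlt : m < s.length := by omega
      rw [List.range_succ, List.take_succ_eq_append_getElem hlt, List.zipIdx_append,
        List.foldl_append, List.foldl_append, ih (by omega)]
      simp [List.length_take, Nat.min_eq_left (le_of_lt hlt), List.getD_eq_getElem?_getD,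
        List.getElem?_eq_getElem hlt]

-- the pairwise recursion has the closed form: positional weights plus the two seeds scaled out
theorem goPair_eq_wsum : ∀ (t : List Int) (f l : Int),
    goPair t f l = f * 10 ^ ((t.length + 1) / 2) + l * 10 ^ (t.length / 2) + wsum t
  | [], f, l => by simp [goPair, wsum]
  | [a], f, l => by simp [goPair, wsum]; ring
  | a :: b :: t, f, l => by
      show goPair t (f * 10 + a) (l * 10 + b) = _
      rw [goPair_eq_wsum t (f * 10 + a) (l * 10 + b)]
      have h1 : (a :: b :: t).length = t.length + 2 := by simp
      have h2 : (t.length + 2 + 1) / 2 = (t.length + 1) / 2 + 1 := by omega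
      have h3 : (t.length + 2) / 2 = t.length / 2 + 1 := by omega
      simp only [wsum, h1, h2, h3, List.length_cons, pow_succ]
      ring

-- B's fold over the indexed prefix equals wsum (M tracks the total prefix length)
theorem foldB_eq_wsum : ∀ (t : List Int) (j : Nat) (a : Int) (M : Int), M = (j : Int) + t.length →
    (t.zipIdx j).foldl
      (fun (acc : Int) (q : Int × Nat) =>
        acc + q.1 * 10 ^ (PySem.Int.floordiv (M - 1 - (q.2 : Int)) 2).toNat) a
    = a + wsum t := by
  intro t
  induction t with
  | nil => intro j a M _; simp [wsum]
  | cons x t ih =>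
      intro j a M hM
      rw [List.zipIdx_cons, List.foldl_cons]
      have hlen : M - 1 - (j : Int) = (t.length : Int) := by simp at hM; omega
      have hfd : (PySem.Int.floordiv (M - 1 - (j : Int)) 2).toNat = t.length / 2 := by
        rw [hlen]
        have h2 : PySem.Int.floordiv (t.length : Int) 2 = ((t.length / 2 : Nat) : Int) := by
          exact_mod_cast PySem.Int.floordiv_natCast t.length 2
        rw [h2]; omega
      rw [hfd, ih (j + 1) _ M (by simp at hM ⊢; omega)]
      simp [wsum]; ring

theorem solve_eq_alt (arr : List Int) (n : Int) (hpre : n ≤ (arr.length : Int)) :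
    solve arr n = solve_alt arr n := by
  simp only [solve, solve_alt]
  set s := PySem.List.sorted arr (fun x => x) false with hs
  have hlen : s.length = arr.length := (PySem.List.sorted_perm arr (fun x => x) false).length_eq
  by_cases hn : 0 ≤ n
  · obtain ⟨m, rfl⟩ : ∃ m : Nat, n = (m : Int) := ⟨n.toNat, (Int.toNat_of_nonneg hn).symm⟩
    have hm : m ≤ s.length := by omega
    have hmax : max ((m : Int)) 0 = (m : Int) := by omega
    rw [hmax, PySem.List.slice_to s (by omega), Int.toNat_natCast]
    -- B side
    have htake : (s.take m).length = m := by simp [List.length_take]; omega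
    rw [foldB_eq_wsum (s.take m) 0 0 (m : Int) (by rw [htake]; simp)]
    -- A side
    rw [PySem.List.pyRange_one]
    have hsub : (((m : Int)) - 0).toNat = m := by omega
    rw [hsub, List.foldl_map]
    have hstep : ∀ (p : Int × Int) (k : Nat),
        ((fun (p : Int × Int) i =>
          if PySem.Int.mod i 2 = 0 then (p.1 * 10 + PySem.List.pyGetD s i 0, p.2)
          else (p.1, p.2 * 10 + PySem.List.pyGetD s i 0)) p ((0 : Int) + (k : Nat)))
        = (fun (p : Int × Int) (k : Nat) (x : Int) =>
            if k % 2 = 0 then (p.1 * 10 + x, p.2) else (p.1, p.2 * 10 + x)) p k (s.getD k 0) := by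
      intro p k
      have hmod : PySem.Int.mod ((k : Nat) : Int) 2 = ((k % 2 : Nat) : Int) := by
        rw [PySem.Int.mod_eq_emod_of_pos (by norm_num)]
        push_cast
        omega
      simp only [zero_add, PySem.List.pyGetD_natCast, hmod]
      norm_cast
    rw [PySem.List.foldl_congr_mem' _ _ _ _ (by intro k _ p; exact hstep p k)]
    rw [range_fold_eq_zipIdx s
      (fun (p : Int × Int) (k : Nat) (x : Int) =>
        if k % 2 = 0 then (p.1 * 10 + x, p.2) else (p.1, p.2 * 10 + x)) m hm (0, 0)]
    have := fold_zipIdx_eq_goPair (s.take m) 0 0 0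
    simp only [Nat.zero_mod, reduceIte] at this
    rw [this, goPair_eq_wsum]
    simp
  · -- n < 0: both sides are 0
    rw [PySem.List.pyRange_one_eq_nil (by omega)]
    have hmax : max n 0 = 0 := by omega
    rw [hmax, PySem.List.slice_to s (by omega)]
    simp

-- ===== VERDICT (by name: the statement is the Claim_ definition above) =====
theorem solve_spec : Claim_equal_solve := by
  intro arr n _ hpre
  unfold Spec_solve
  exact solve_eq_alt arr n hpre
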